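-- pv_equiv track=rewrite | github.com/rileymotylinski/umn | csci1913/labs/lab2 - nim/nim.py | create_game_state
-- ===== SOURCE A (Python) =====
-- def create_game_state(size: int,token_max: int) -> list:
--     '''
--     creates a nim game board w/ appropriate number of tokens
--
--     Args:
--     size -- int -- how many rows are in the game board
--     token_max -- int -- max number of tokens to be reached
--
--     Returns:
--     list -- created game board
--
--     '''
--
--     if size == 0:
--         return []
--
--     board = []
--
--     # number of rows is [1,size], inclusive
--     for i in range(1,size+1):
--         if i < token_max:
--             board.append(i)
--         # if we have reached token_max before size, then
--         # begin appending max number of tokens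
--         else:
--             board.append(token_max)
--     return board
-- ===== SOURCE B (Python) =====
-- def create_game_state(size: int, token_max: int) -> list:
--     ramp = max(0, min(size, token_max - 1))
--     return list(range(1, ramp + 1)) + [token_max] * (size - ramp)
-- ===== Notes on version B (the rewrite author's own statement) =====
-- stated objective: simpler
-- what changed: Replaces the per-element conditional append loop with a closed-form two-segment build: the ascending ramp range(1, ramp+1) with ramp = max(0, min(size, token_max-1)) concatenated with the constant plateau [token_max]*(size-ramp).
import Mathlib
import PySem

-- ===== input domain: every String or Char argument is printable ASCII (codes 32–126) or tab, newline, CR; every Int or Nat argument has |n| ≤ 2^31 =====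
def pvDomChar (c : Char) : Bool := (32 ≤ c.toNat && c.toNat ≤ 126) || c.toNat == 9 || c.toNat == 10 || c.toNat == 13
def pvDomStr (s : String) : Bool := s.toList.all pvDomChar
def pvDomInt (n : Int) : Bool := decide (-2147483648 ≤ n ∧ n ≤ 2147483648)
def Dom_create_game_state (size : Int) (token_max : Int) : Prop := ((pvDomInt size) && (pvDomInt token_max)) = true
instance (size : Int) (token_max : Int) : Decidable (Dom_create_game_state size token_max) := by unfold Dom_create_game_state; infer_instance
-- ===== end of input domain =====

-- B builds the board as two closed-form segments (ascending ramp ++ constant plateau)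
-- instead of A's per-element conditional append loop; objective: simpler.

-- ===== PORT A =====
def create_game_state (size : Int) (token_max : Int) : List Int :=
  if size = 0 then []
  else
    (PySem.List.pyRange 1 (size + 1) 1).foldl
      (fun board i => if i < token_max then board ++ [i] else board ++ [token_max]) []

-- ===== PORT B =====
def create_game_state_alt (size : Int) (token_max : Int) : List Int :=
  let ramp := max 0 (min size (token_max - 1))
  PySem.List.pyRange 1 (ramp + 1) 1 ++ List.replicate (size - ramp).toNat token_max

-- ===== PRECONDITION & SPEC =====
def Spec_create_game_state (size : Int) (token_max : Int) (out : List Int) : Prop := out = create_game_state_alt size token_max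
instance (size : Int) (token_max : Int) (out : List Int) : Decidable (Spec_create_game_state size token_max out) := by unfold Spec_create_game_state; infer_instance

-- ===== CLAIM (what is proved, stated in full; the proofs are below) =====
def Claim_equal_create_game_state : Prop := ∀ (size : Int) (token_max : Int), Dom_create_game_state size token_max → Spec_create_game_state size token_max (create_game_state size token_max)

-- ===== LEMMAS AND PROOFS =====

-- A's loop body is 'append (min-like value of i)': fold = map over the range.
theorem create_game_state_eq_map (size token_max : Int) (h : size ≠ 0) :
    create_game_state size token_max
      = (PySem.List.pyRange 1 (size + 1) 1).map
          (fun i => if i < token_max then i else token_max) := by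
  unfold create_game_state
  rw [if_neg h]
  have hb : (fun (board : List Int) i => if i < token_max then board ++ [i] else board ++ [token_max])
      = fun board i => board ++ [if i < token_max then i else token_max] := by
    funext b i; split <;> rfl
  rw [hb, PySem.List.foldl_append_singleton_eq_map]
  simp

theorem create_game_state_spec_aux (size token_max : Int) :
    create_game_state size token_max = create_game_state_alt size token_max := by
  by_cases h0 : size = 0
  · subst h0
    simp [create_game_state, create_game_state_alt, PySem.List.pyRange_one_eq_nil]
  rw [create_game_state_eq_map _ _ h0]
  unfold create_game_state_alt
  by_cases hneg : size < 0
  · have hr : max 0 (min size (token_max - 1)) = 0 := by omega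
    rw [PySem.List.pyRange_one_eq_nil (show size + 1 ≤ 1 by omega)]
    simp [hr, PySem.List.pyRange_one_eq_nil]
    omega
  · set ramp := max 0 (min size (token_max - 1)) with hramp
    have h1 : (1:Int) ≤ ramp + 1 := by omega
    have h2 : ramp + 1 ≤ size + 1 := by omega
    rw [PySem.List.pyRange_one_append 1 (ramp + 1) (size + 1) h1 h2, List.map_append]
    congr 1
    · rw [List.map_congr_left (g := id) (fun i hi => ?_), List.map_id]
      have := PySem.List.mem_pyRange_one.mp hi
      rw [if_pos (by omega)]
      rfl
    · rw [List.map_congr_left (g := fun _ => token_max) (fun i hi => ?_)]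
      · rw [List.map_const', PySem.List.length_pyRange_one]
        congr 1
        omega
      · have := PySem.List.mem_pyRange_one.mp hi
        rw [if_neg (by omega)]

-- ===== VERDICT (by name: the statement is the Claim_ definition above) =====
theorem create_game_state_spec : Claim_equal_create_game_state := by
  intro size token_max _
  exact create_game_state_spec_aux size token_max
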